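-- pv_equiv track=rewrite | github.com/ChakravueAI25/emr_dashboard | backend/agents/safety/clinical_validator.py | hallucination_check
-- ===== SOURCE A (Python) =====
-- def hallucination_check(output: str, signals: list[str]) -> bool:
--     """
--     Reject if output mentions finding not present in signals.
--     """
--     signal_text = " ".join(signals).lower()
--
--     for word in output.lower().split():
--         # Strip punctuation from word for cleaner matching
--         clean_word = word.strip(".,;:()[]{}")
--         if not clean_word:
--             continue
--
--         if clean_word not in signal_text and clean_word in [
--             "edema", "uveitis", "hemorrhage", "detachment", "opacity"
--         ]:
--             return False
--     return True
-- ===== SOURCE B (Python) =====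
-- def hallucination_check(output: str, signals: list[str]) -> bool:
--     """
--     Reject if output mentions finding not present in signals.
--     """
--     signal_text = " ".join(signals).lower()
--     words = {w.strip(".,;:()[]{}") for w in output.lower().split()}
--     words.discard("")
--     for term in ["edema", "uveitis", "hemorrhage", "detachment", "opacity"]:
--         if term in words and term not in signal_text:
--             return False
--     return True
-- ===== Notes on version B (the rewrite author's own statement) =====
-- stated objective: simpler
-- what changed: Instead of scanning every output word and testing it against the term list, B builds the set of cleaned output words once and iterates over the five fixed clinical terms, rejecting when a term is among the output words but not a substring of the joined signal text.
import Mathlib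
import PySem

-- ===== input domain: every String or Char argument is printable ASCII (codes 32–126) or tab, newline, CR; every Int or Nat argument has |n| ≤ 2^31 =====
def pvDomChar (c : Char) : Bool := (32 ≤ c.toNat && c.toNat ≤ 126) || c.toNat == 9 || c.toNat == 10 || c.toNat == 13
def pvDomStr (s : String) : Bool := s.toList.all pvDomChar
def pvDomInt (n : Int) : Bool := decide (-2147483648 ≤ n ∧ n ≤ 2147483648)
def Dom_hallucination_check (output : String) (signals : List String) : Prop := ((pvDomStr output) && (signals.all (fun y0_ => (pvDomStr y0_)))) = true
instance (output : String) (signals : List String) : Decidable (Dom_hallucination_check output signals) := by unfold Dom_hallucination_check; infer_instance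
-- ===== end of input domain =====

-- B replaces A's per-word scan of the output by one pass over the five fixed clinical terms
-- against a set of cleaned output words: simpler decomposition, same result.


-- ===== PORT A =====
-- A's for-loop over output.lower().split() with early return False
def hallA_loop (signal_text : String) : List String → Bool
  | [] => true
  | w :: ws =>
    let clean_word := PySem.Str.stripChars w ".,;:()[]{}"
    if clean_word = "" then hallA_loop signal_text ws
    else if !(PySem.Str.isIn clean_word signal_text)
            && ["edema", "uveitis", "hemorrhage", "detachment", "opacity"].contains clean_word
         then false
         else hallA_loop signal_text ws

def hallucination_check (output : String) (signals : List String) : Bool :=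
  let signal_text := PySem.Str.lower (PySem.Str.join " " signals)
  hallA_loop signal_text (PySem.Str.split₀ (PySem.Str.lower output))

-- ===== PORT B =====
def hallucination_check_alt (output : String) (signals : List String) : Bool :=
  let signal_text := PySem.Str.lower (PySem.Str.join " " signals)
  let words := PySem.Set.discard
    (PySem.Set.ofList ((PySem.Str.split₀ (PySem.Str.lower output)).map
      (fun w => PySem.Str.stripChars w ".,;:()[]{}"))) ""
  ["edema", "uveitis", "hemorrhage", "detachment", "opacity"].all
    (fun term => !(PySem.Set.contains words term && !(PySem.Str.isIn term signal_text)))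

-- ===== PRECONDITION & SPEC =====
def Spec_hallucination_check (output : String) (signals : List String) (out : Bool) : Prop := out = hallucination_check_alt output signals
instance (output : String) (signals : List String) (out : Bool) : Decidable (Spec_hallucination_check output signals out) := by unfold Spec_hallucination_check; infer_instance

-- ===== CLAIM (what is proved, stated in full; the proofs are below) =====
def Claim_equal_hallucination_check : Prop := ∀ (output : String) (signals : List String), Dom_hallucination_check output signals → Spec_hallucination_check output signals (hallucination_check output signals)

-- ===== LEMMAS AND PROOFS =====

-- A's loop as a boolean "all": each word is fine if its cleaned form is empty,
-- occurs in the signal text, or is not one of the five terms.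
lemma hallA_loop_eq_all (st : String) (ws : List String) :
    hallA_loop st ws = ws.all (fun w =>
      let c := PySem.Str.stripChars w ".,;:()[]{}"
      (c == "") || PySem.Str.isIn c st
        || !(["edema", "uveitis", "hemorrhage", "detachment", "opacity"].contains c)) := by
  induction ws with
  | nil => rfl
  | cons w ws ih =>
    simp only [hallA_loop, List.all_cons, ih]
    by_cases h0 : PySem.Str.stripChars w ".,;:()[]{}" = ""
    · simp [h0]
    · simp only [if_neg h0]
      cases hIn : PySem.Str.isIn (PySem.Str.stripChars w ".,;:()[]{}") st <;>
        cases hMem : ["edema", "uveitis", "hemorrhage", "detachment", "opacity"].contains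
          (PySem.Str.stripChars w ".,;:()[]{}") <;>
        simp [h0]

lemma core_eq (st : String) (ws : List String) :
    hallA_loop st ws =
      ["edema", "uveitis", "hemorrhage", "detachment", "opacity"].all
        (fun term =>
          !(PySem.Set.contains
              (PySem.Set.discard
                (PySem.Set.ofList (ws.map (fun w => PySem.Str.stripChars w ".,;:()[]{}"))) "")
              term
            && !(PySem.Str.isIn term st))) := by
  rw [hallA_loop_eq_all]
  have hmem : ∀ t : String,
      t ∈ PySem.Set.discard
            (PySem.Set.ofList (ws.map (fun w => PySem.Str.stripChars w ".,;:()[]{}"))) ""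
      ↔ (t ∈ ws.map (fun w => PySem.Str.stripChars w ".,;:()[]{}") ∧ t ≠ "") := by
    intro t
    simp [PySem.Set.discard, List.mem_filter, PySem.Set.mem_ofList]
  rw [Bool.eq_iff_iff]
  simp only [List.all_eq_true]
  constructor
  · intro hA t ht
    by_cases hc : t ∈ PySem.Set.discard
        (PySem.Set.ofList (ws.map (fun w => PySem.Str.stripChars w ".,;:()[]{}"))) ""
    · rcases (hmem t).mp hc with ⟨hmap, hne⟩
      rcases List.mem_map.mp hmap with ⟨w, hw, hcw⟩
      have h2 := hA w hw
      simp only [hcw, Bool.or_eq_true, beq_iff_eq, Bool.not_eq_true'] at h2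
      rcases h2 with (h | h) | h
      · exact absurd h hne
      · have h' : PySem.Chars.isIn t.toList st.toList = true := by simpa using h
        simp [h']
      · have hmemT := List.contains_iff_mem.mpr ht
        simp only [h] at hmemT
        exact absurd hmemT (by decide)
    · have hcf : PySem.Set.contains
          (PySem.Set.discard
            (PySem.Set.ofList (ws.map (fun w => PySem.Str.stripChars w ".,;:()[]{}"))) "")
          t = false :=
        Bool.eq_false_iff.mpr (fun htrue => hc ((PySem.Set.contains_iff _ _).mp htrue))
      simp only [hcf, Bool.false_and, Bool.not_false]
  · intro hB w hw
    show (let c := PySem.Str.stripChars w ".,;:()[]{}"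
      (c == "") || PySem.Str.isIn c st
        || !(["edema", "uveitis", "hemorrhage", "detachment", "opacity"].contains c)) = true
    by_cases h0 : PySem.Str.stripChars w ".,;:()[]{}" = ""
    · simp [h0]
    · by_cases hmemT : PySem.Str.stripChars w ".,;:()[]{}" ∈
          (["edema", "uveitis", "hemorrhage", "detachment", "opacity"] : List String)
      · have h2 := hB _ hmemT
        have hcmem : PySem.Str.stripChars w ".,;:()[]{}" ∈ PySem.Set.discard
            (PySem.Set.ofList (ws.map (fun w => PySem.Str.stripChars w ".,;:()[]{}"))) "" :=
          (hmem _).mpr ⟨List.mem_map.mpr ⟨w, hw, rfl⟩, h0⟩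
        have hcon := (PySem.Set.contains_iff _ _).mpr hcmem
        simp only [hcon, Bool.true_and, Bool.not_eq_true', Bool.not_eq_false'] at h2
        simp only [Bool.or_eq_true, beq_iff_eq, Bool.not_eq_true']
        exact Or.inl (Or.inr h2)
      · have hcf : (["edema", "uveitis", "hemorrhage", "detachment",
            "opacity"] : List String).contains (PySem.Str.stripChars w ".,;:()[]{}") = false :=
          Bool.eq_false_iff.mpr (fun ht => hmemT (List.contains_iff_mem.mp ht))
        simp only [Bool.or_eq_true, beq_iff_eq, Bool.not_eq_true']
        exact Or.inr hcf

-- ===== VERDICT (by name: the statement is the Claim_ definition above) =====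
theorem hallucination_check_spec : Claim_equal_hallucination_check := by
  intro output signals _
  unfold Spec_hallucination_check hallucination_check hallucination_check_alt
  exact core_eq _ _
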